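-- pv_equiv track=rewrite | github.com/evdanil/cn-tool | cn-tool.py | prepare_device_data
-- ===== SOURCE A (Python) =====
-- def prepare_device_data(device_data_list: list) -> tuple:
--     # This function prepares data gathered by process_device_data to a format suitable for saving in excel table
--     all_columns = set()
--     devices = {}
--
--     def merge_device_info(info1: dict, info2: dict) -> dict:
--         merged = info1.copy()
--         for key, value in info2.items():
--             if not merged.get(key) and value:
--                 merged[key] = value
--         return merged
--
--     for device_data in device_data_list:
--         for row in device_data:
--             all_columns.update(row.keys())
--             device_key = (row['Device Name'], row.get('Serial Number', ''), row.get('License Name', ''))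
--
--             if device_key not in devices:
--                 devices[device_key] = row.copy()
--             else:
--                 devices[device_key] = merge_device_info(devices[device_key], row)
--
--     # Create final rows
--     rows = list(devices.values())
--
--     # Define priority columns
--     priority_columns = [
--         'Device Name',
--         'Serial Number',
--         'Product ID (PID)',
--         'Parent Device Name',
--         'Stack Role',
--         'Software Version',
--         'Software Image',
--         'License Name',
--         'License Type',
--         'Confirmation Code',
--         'License Count',
--         'License Entitlement Tag',
--         'License Period Left',
--         'License Priority',
--         'License Reservation Status',
--         'License State',
--         'License Status',
--         'Uptime'
--         ]
--
--     # Sort columns with priority columns first, no other than priority columns expected,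
--     # but if they present they will be added at the end
--     other_columns = sorted(col for col in all_columns if col not in priority_columns)
--     columns = priority_columns + other_columns
--
--     # Ensure all rows have all columns (fill with empty string if missing)
--     for row in rows:
--         for col in columns:
--             if col not in row:
--                 row[col] = ''
--
--     # Convert rows to list format
--     row_data = [[row.get(col, '') for col in columns] for row in rows]
--
--     return columns, row_data
-- ===== SOURCE B (Python) =====
-- def prepare_device_data(device_data_list: list) -> tuple:
--     # Group rows by device key once, then compute each output cell directly as the
--     # first non-empty value for its column across the group's rows (no dict merging,
--     # no fill pass).
--     priority_columns = [
--         'Device Name',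
--         'Serial Number',
--         'Product ID (PID)',
--         'Parent Device Name',
--         'Stack Role',
--         'Software Version',
--         'Software Image',
--         'License Name',
--         'License Type',
--         'Confirmation Code',
--         'License Count',
--         'License Entitlement Tag',
--         'License Period Left',
--         'License Priority',
--         'License Reservation Status',
--         'License State',
--         'License Status',
--         'Uptime'
--         ]
--
--     all_columns = set()
--     groups = {}
--     for device_data in device_data_list:
--         for row in device_data:
--             all_columns.update(row.keys())
--             key = (row['Device Name'], row.get('Serial Number', ''), row.get('License Name', ''))
--             groups.setdefault(key, []).append(row)
--
--     other_columns = sorted(col for col in all_columns if col not in priority_columns)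
--     columns = priority_columns + other_columns
--
--     def cell(rows: list, col: str) -> str:
--         for r in rows:
--             v = r.get(col, '')
--             if v:
--                 return v
--         return ''
--
--     row_data = [[cell(rows, col) for col in columns] for rows in groups.values()]
--     return columns, row_data
-- ===== Notes on version B (the rewrite author's own statement) =====
-- stated objective: alternative
-- what changed: B collects each device's rows into a grouped list in one pass and computes every output cell directly as the first non-empty value of its column across the group, replacing A's incremental dict-copy merging and its column fill pass.
import Mathlib
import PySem

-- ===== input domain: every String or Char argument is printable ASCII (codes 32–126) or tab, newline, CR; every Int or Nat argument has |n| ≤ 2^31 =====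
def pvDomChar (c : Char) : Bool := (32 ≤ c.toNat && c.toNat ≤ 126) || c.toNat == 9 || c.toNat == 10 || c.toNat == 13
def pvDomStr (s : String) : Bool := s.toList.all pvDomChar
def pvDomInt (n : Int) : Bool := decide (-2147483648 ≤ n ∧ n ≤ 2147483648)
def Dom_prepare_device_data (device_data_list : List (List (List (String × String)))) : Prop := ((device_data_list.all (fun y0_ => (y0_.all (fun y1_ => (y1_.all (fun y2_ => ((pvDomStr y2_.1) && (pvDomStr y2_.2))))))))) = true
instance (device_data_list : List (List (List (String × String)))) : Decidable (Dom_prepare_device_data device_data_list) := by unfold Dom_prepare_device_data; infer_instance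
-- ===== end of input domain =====

-- B groups the rows by device key and computes every output cell directly as the first
-- non-empty value for its column over the group, instead of A's dict-merging plus a
-- fill pass; equivalence of the RETURN value is proved (neither version mutates its input).

-- the priority_columns literal, shared by both Pythons
def priorityColumns : List String :=
  ["Device Name", "Serial Number", "Product ID (PID)", "Parent Device Name", "Stack Role",
   "Software Version", "Software Image", "License Name", "License Type", "Confirmation Code",
   "License Count", "License Entitlement Tag", "License Period Left", "License Priority",
   "License Reservation Status", "License State", "License Status", "Uptime"]

-- ===== PORT A =====
-- merge_device_info: 'not merged.get(key)' is getD key "" = "" (None or empty string)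
def mergeDeviceInfo (info1 info2 : PySem.Dict String String) : PySem.Dict String String :=
  info2.items.foldl
    (fun merged kv => if merged.getD kv.1 "" = "" ∧ kv.2 ≠ "" then merged.insert kv.1 kv.2 else merged)
    info1

-- one iteration of A's row loop; row['Device Name'] raises KeyError when the key is
-- missing — Pre_ requires it, so getD "Device Name" "" is exact there
def stepA (st : PySem.Set String × PySem.Dict (String × String × String) (PySem.Dict String String))
    (row : List (String × String)) :
    PySem.Set String × PySem.Dict (String × String × String) (PySem.Dict String String) :=
  let rowD := PySem.Dict.mk row
  let allCols := PySem.Set.update st.1 rowD.keys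
  let key := (rowD.getD "Device Name" "", rowD.getD "Serial Number" "", rowD.getD "License Name" "")
  match st.2.get? key with
  | none => (allCols, st.2.insert key rowD)
  | some existing => (allCols, st.2.insert key (mergeDeviceInfo existing rowD))

def prepare_device_data (device_data_list : List (List (List (String × String)))) :
    List String × List (List String) :=
  let st := device_data_list.foldl (fun st device_data => device_data.foldl stepA st)
    (PySem.Set.empty, PySem.Dict.empty)
  let rows := st.2.values
  let other_columns := PySem.List.sorted (st.1.filter (fun c => !(priorityColumns.contains c))) (fun c => c) false
  let columns := priorityColumns ++ other_columns
  let rows2 := rows.map (fun row => columns.foldl (fun r col => if r.contains col then r else r.insert col "") row)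
  (columns, rows2.map (fun row => columns.map (fun col => row.getD col "")))

-- ===== PORT B =====
-- cell(rows, col): first non-empty value of col over the group's rows
def pdCell (rows : List (List (String × String))) (col : String) : String :=
  match rows with
  | [] => ""
  | r :: rest =>
    let v := (PySem.Dict.mk r).getD col ""
    if v ≠ "" then v else pdCell rest col

-- one iteration of B's row loop; groups.setdefault(key, []).append(row) is Dict.modify
def stepB (st : PySem.Set String × PySem.Dict (String × String × String) (List (List (String × String))))
    (row : List (String × String)) :
    PySem.Set String × PySem.Dict (String × String × String) (List (List (String × String))) :=
  let rowD := PySem.Dict.mk row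
  let key := (rowD.getD "Device Name" "", rowD.getD "Serial Number" "", rowD.getD "License Name" "")
  (PySem.Set.update st.1 rowD.keys, st.2.modify key [] (· ++ [row]))

def prepare_device_data_alt (device_data_list : List (List (List (String × String)))) :
    List String × List (List String) :=
  let st := device_data_list.foldl (fun st device_data => device_data.foldl stepB st)
    (PySem.Set.empty, PySem.Dict.empty)
  let other_columns := PySem.List.sorted (st.1.filter (fun c => !(priorityColumns.contains c))) (fun c => c) false
  let columns := priorityColumns ++ other_columns
  (columns, st.2.values.map (fun rs => columns.map (fun col => pdCell rs col)))

-- ===== PRECONDITION & SPEC =====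
-- Pre_ excludes (a) rows without a 'Device Name' key, on which A raises KeyError, and
-- (b) rows whose key list has duplicates, which no Python dict argument can represent.
def Pre_prepare_device_data (device_data_list : List (List (List (String × String)))) : Prop :=
  ∀ dd ∈ device_data_list, ∀ row ∈ dd,
    (row.map Prod.fst).Nodup ∧ "Device Name" ∈ row.map Prod.fst
instance (device_data_list : List (List (List (String × String)))) : Decidable (Pre_prepare_device_data device_data_list) := by unfold Pre_prepare_device_data; infer_instance

def pvWitness_prepare_device_data : (List (List (List (String × String)))) :=
  [[[("Device Name", "sw1"), ("Uptime", "5d")], [("Device Name", "sw1"), ("Serial Number", "")]]]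

def Spec_prepare_device_data (device_data_list : List (List (List (String × String)))) (out : List String × List (List String)) : Prop := out = prepare_device_data_alt device_data_list
instance (device_data_list : List (List (List (String × String)))) (out : List String × List (List String)) : Decidable (Spec_prepare_device_data device_data_list out) := by unfold Spec_prepare_device_data; infer_instance

-- ===== CLAIM (what is proved, stated in full; the proofs are below) =====
def Claim_equal_prepare_device_data : Prop := ∀ (device_data_list : List (List (List (String × String)))), Dom_prepare_device_data device_data_list → Pre_prepare_device_data device_data_list → Spec_prepare_device_data device_data_list (prepare_device_data device_data_list)

-- ===== LEMMAS AND PROOFS =====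

-- the merged dict and the group's row list agree on every column lookup
def RelV (m : PySem.Dict String String) (rs : List (List (String × String))) : Prop :=
  ∀ col, m.getD col "" = pdCell rs col

def RelP (a : (String × String × String) × PySem.Dict String String)
    (b : (String × String × String) × List (List (String × String))) : Prop :=
  a.1 = b.1 ∧ RelV a.2 b.2

def RelD (d : PySem.Dict (String × String × String) (PySem.Dict String String))
    (g : PySem.Dict (String × String × String) (List (List (String × String)))) : Prop :=
  List.Forall₂ RelP d.items g.items

lemma mk_getD_cons (k v : String) (rest : List (String × String)) (col : String) :
    (PySem.Dict.mk ((k, v) :: rest)).getD col "" =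
      if k == col then v else (PySem.Dict.mk rest).getD col "" := by
  rw [PySem.Dict.getD_eq_get?_getD, PySem.Dict.get?_mk_cons]
  by_cases h : (k == col) = true
  · simp [h]
  · simp only [Bool.not_eq_true] at h
    simp [h, PySem.Dict.getD_eq_get?_getD]

lemma mk_getD_not_mem (rest : List (String × String)) (k : String)
    (hk : k ∉ rest.map Prod.fst) : (PySem.Dict.mk rest).getD k "" = "" := by
  induction rest with
  | nil => rfl
  | cons p t ih =>
    obtain ⟨a, b⟩ := p
    simp only [List.map_cons, List.mem_cons, not_or] at hk
    rw [mk_getD_cons]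
    have ha : (a == k) = false := by simp; exact fun e => hk.1 e.symm
    simp [ha, ih hk.2]

lemma relD_contains {d g} (h : RelD d g) (k : String × String × String) :
    d.contains k = g.contains k := by
  obtain ⟨l⟩ := d; obtain ⟨l'⟩ := g
  have h' : List.Forall₂ RelP l l' := h
  clear h
  simp only [PySem.Dict.contains]
  induction h' with
  | nil => rfl
  | cons hab _ ih => simp only [List.any_cons, hab.1, ih]

lemma relD_get? {d g} (h : RelD d g) (k : String × String × String) :
    (d.get? k = none ∧ g.get? k = none) ∨
      ∃ m rs, d.get? k = some m ∧ g.get? k = some rs ∧ RelV m rs := by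
  obtain ⟨l⟩ := d; obtain ⟨l'⟩ := g
  have h' : List.Forall₂ RelP l l' := h
  clear h
  simp only [PySem.Dict.get?]
  induction h' with
  | nil => left; simp
  | cons hab tail ih =>
    rename_i a b l1 l2
    simp only [List.find?]
    rw [hab.1]
    by_cases hk : (b.1 == k) = true
    · simp only [hk]; right; exact ⟨a.2, b.2, rfl, rfl, hab.2⟩
    · simp only [Bool.not_eq_true] at hk; simp only [hk]; exact ih

lemma relD_insert {d g} (h : RelD d g) (k : String × String × String) {v w}
    (hvw : RelV v w) : RelD (d.insert k v) (g.insert k w) := by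
  have hc := relD_contains h k
  obtain ⟨l⟩ := d; obtain ⟨l'⟩ := g
  have h' : List.Forall₂ RelP l l' := h
  unfold RelD
  simp only [PySem.Dict.insert, hc]
  by_cases hgc : (PySem.Dict.mk l').contains k = true
  · simp only [hgc, if_true]
    show List.Forall₂ RelP (l.map _) (l'.map _)
    clear h hc hgc
    induction h' with
    | nil => exact List.Forall₂.nil
    | cons hab tail ih =>
      rename_i a b l1 l2
      simp only [List.map_cons]
      refine List.Forall₂.cons ?_ ih
      rw [hab.1]
      by_cases hk : (b.1 == k) = true
      · simp only [hk, if_true]; exact ⟨rfl, hvw⟩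
      · simp only [Bool.not_eq_true] at hk; simp only [hk]; exact hab
  · simp only [hgc]
    have hsing : List.Forall₂ RelP [(k, v)] [(k, w)] := List.Forall₂.cons ⟨rfl, hvw⟩ List.Forall₂.nil
    simp only [Bool.false_eq_true, if_false]
    show List.Forall₂ RelP (l ++ _) (l' ++ _)
    clear h hc hgc
    induction h' with
    | nil => exact hsing
    | cons hab _ ih => exact List.Forall₂.cons hab ih

lemma merge_getD (row : List (String × String)) (hnd : (row.map Prod.fst).Nodup)
    (m : PySem.Dict String String) (col : String) :
    (mergeDeviceInfo m (PySem.Dict.mk row)).getD col "" =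
      if m.getD col "" = "" then (PySem.Dict.mk row).getD col "" else m.getD col "" := by
  induction row generalizing m with
  | nil =>
    show m.getD col "" = _
    by_cases h : m.getD col "" = ""
    · rw [if_pos h, h]; rfl
    · rw [if_neg h]
  | cons kv rest ih =>
    obtain ⟨k, v⟩ := kv
    simp only [List.map_cons, List.nodup_cons] at hnd
    obtain ⟨hknm, hndr⟩ := hnd
    show (List.foldl _ (if m.getD k "" = "" ∧ v ≠ "" then m.insert k v else m) rest).getD col "" = _
    have step : ∀ m' : PySem.Dict String String,
        (List.foldl (fun merged kv => if merged.getD kv.1 "" = "" ∧ kv.2 ≠ "" then merged.insert kv.1 kv.2 else merged) m' rest) = mergeDeviceInfo m' (PySem.Dict.mk rest) := fun _ => rfl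
    rw [step, ih hndr, mk_getD_cons]
    by_cases hcol : k = col
    · subst hcol
      rw [beq_self_eq_true, if_pos rfl, mk_getD_not_mem rest k hknm]
      by_cases h1 : m.getD k "" = ""
      · by_cases h2 : v = ""
        · subst h2
          simp [h1]
        · simp [h1, h2]
      · simp [h1]
    · have hne : (k == col) = false := by simp; exact fun e => hcol e
      have hm1 : (if m.getD k "" = "" ∧ v ≠ "" then m.insert k v else m).getD col "" = m.getD col "" := by
        split
        · rw [PySem.Dict.getD_insert, if_neg (Ne.symm hcol)]
        · rfl
      rw [hm1, hne]
      simp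

lemma pdCell_append (rs : List (List (String × String))) (row : List (String × String)) (col : String) :
    pdCell (rs ++ [row]) col =
      if pdCell rs col = "" then (PySem.Dict.mk row).getD col "" else pdCell rs col := by
  induction rs with
  | nil =>
    by_cases h : (PySem.Dict.mk row).getD col "" = "" <;> simp [pdCell, h]
  | cons r rest ih =>
    show (if ((PySem.Dict.mk r).getD col "") ≠ "" then _ else pdCell (rest ++ [row]) col) = _
    by_cases hv : ((PySem.Dict.mk r).getD col "") = ""
    · rw [if_neg (by simpa using hv), ih]
      have : pdCell (r :: rest) col = pdCell rest col := by
        show (if ((PySem.Dict.mk r).getD col "") ≠ "" then _ else _) = _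
        rw [if_neg (by simpa using hv)]
      rw [this]
    · rw [if_pos hv]
      have : pdCell (r :: rest) col = (PySem.Dict.mk r).getD col "" := by
        show (if ((PySem.Dict.mk r).getD col "") ≠ "" then _ else _) = _
        rw [if_pos hv]
      rw [this, if_neg hv]

lemma fill_getD (cols : List String) (r : PySem.Dict String String) (col : String) :
    (cols.foldl (fun r c => if r.contains c then r else r.insert c "") r).getD col "" =
      r.getD col "" := by
  induction cols generalizing r with
  | nil => rfl
  | cons c t ih =>
    rw [List.foldl_cons, ih]
    split
    · rfl
    · next hc =>
      rw [PySem.Dict.getD_insert]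
      split
      · next e =>
        subst e
        exact (PySem.Dict.getD_of_not_contains r "" (by simpa using hc)).symm
      · rfl

lemma pdCell_singleton (row : List (String × String)) (col : String) :
    pdCell [row] col = (PySem.Dict.mk row).getD col "" := by
  by_cases h : (PySem.Dict.mk row).getD col "" = "" <;> simp [pdCell, h]

lemma step_rel (st1 st2) (row : List (String × String)) (hnd : (row.map Prod.fst).Nodup)
    (hS : st1.1 = st2.1) (hR : RelD st1.2 st2.2) :
    (stepA st1 row).1 = (stepB st2 row).1 ∧ RelD (stepA st1 row).2 (stepB st2 row).2 := by
  rcases relD_get? hR ((PySem.Dict.mk row).getD "Device Name" "", (PySem.Dict.mk row).getD "Serial Number" "", (PySem.Dict.mk row).getD "License Name" "") with ⟨hn1, hn2⟩ | ⟨m, rs, hs1, hs2, hV⟩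
  · have hB : st2.2.getD ((PySem.Dict.mk row).getD "Device Name" "", (PySem.Dict.mk row).getD "Serial Number" "", (PySem.Dict.mk row).getD "License Name" "") [] = [] := by
      rw [PySem.Dict.getD_eq_get?_getD, hn2]; rfl
    constructor
    · simp only [stepA, stepB, hn1, hS]
    · simp only [stepA, stepB, hn1, PySem.Dict.modify, hB, List.nil_append]
      exact relD_insert hR _ (fun col => (pdCell_singleton row col).symm)
  · have hB : st2.2.getD ((PySem.Dict.mk row).getD "Device Name" "", (PySem.Dict.mk row).getD "Serial Number" "", (PySem.Dict.mk row).getD "License Name" "") [] = rs := by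
      rw [PySem.Dict.getD_eq_get?_getD, hs2]; rfl
    constructor
    · simp only [stepA, stepB, hs1, hS]
    · simp only [stepA, stepB, hs1, PySem.Dict.modify, hB]
      refine relD_insert hR _ (fun col => ?_)
      rw [merge_getD row hnd m col, pdCell_append, ← hV col]

lemma fold_rel (rows : List (List (String × String))) (st1 st2)
    (hnd : ∀ row ∈ rows, (row.map Prod.fst).Nodup)
    (hS : st1.1 = st2.1) (hR : RelD st1.2 st2.2) :
    (rows.foldl stepA st1).1 = (rows.foldl stepB st2).1 ∧
      RelD (rows.foldl stepA st1).2 (rows.foldl stepB st2).2 := by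
  induction rows generalizing st1 st2 with
  | nil => exact ⟨hS, hR⟩
  | cons row rest ih =>
    obtain ⟨h1, h2⟩ := step_rel st1 st2 row (hnd row (List.mem_cons_self)) hS hR
    exact ih _ _ (fun r hr => hnd r (List.mem_cons_of_mem _ hr)) h1 h2

lemma out_rel (cols : List String) {d g} (h : RelD d g) :
    (d.values.map (fun row => cols.foldl (fun r col => if r.contains col then r else r.insert col "") row)).map
        (fun row => cols.map (fun col => row.getD col "")) =
      g.values.map (fun rs => cols.map (fun col => pdCell rs col)) := by
  obtain ⟨l⟩ := d; obtain ⟨l'⟩ := g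
  have h' : List.Forall₂ RelP l l' := h
  clear h
  simp only [PySem.Dict.values, List.map_map]
  induction h' with
  | nil => rfl
  | cons hab _ ih =>
    simp only [List.map_cons, ih]
    congr 1
    exact List.map_congr_left (fun c _ => by rw [Function.comp_apply, fill_getD, hab.2 c])

-- ===== VERDICT (by name: the statement is the Claim_ definition above) =====
theorem prepare_device_data_spec : Claim_equal_prepare_device_data := by
  intro ddl hDom hPre
  unfold Spec_prepare_device_data
  show prepare_device_data ddl = prepare_device_data_alt ddl
  simp only [prepare_device_data, prepare_device_data_alt]
  rw [← List.foldl_flatten, ← List.foldl_flatten]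
  obtain ⟨hS, hR⟩ := fold_rel ddl.flatten (PySem.Set.empty, PySem.Dict.empty)
    (PySem.Set.empty, PySem.Dict.empty)
    (fun row hr => by
      obtain ⟨dd, hdd, hrow⟩ := List.mem_flatten.mp hr
      exact (hPre dd hdd row hrow).1)
    rfl List.Forall₂.nil
  rw [hS]
  exact congrArg _ (out_rel _ hR)
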